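-- pv_equiv track=rewrite | github.com/yyang944-prog/USC-DSCI_510-final_project | src/utils/ticker_detect.py | extract_by_alias
-- ===== SOURCE A (Python) =====
-- from typing import Dict, Iterable, List, Set
--
-- def extract_by_alias(text: str, alias_map: Dict[str, Iterable[str]]) -> Set[str]:
--     """Alias/company-name based detection (case-insensitive)."""
--     if not text:
--         return set()
--     low = text.lower()
--     hits: Set[str] = set()
--     for ticker, names in alias_map.items():
--         for name in names:
--             if name.lower() in low:
--                 hits.add(ticker); break
--     return hits
-- ===== SOURCE B (Python) =====
-- def extract_by_alias(text, alias_map):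
--     """Alias/company-name based detection (case-insensitive)."""
--     if not text:
--         return set()
--     low = text.lower()
--     # index every substring of low whose length matches some alias length, once
--     lengths = {len(n) for names in alias_map.values() for n in names}
--     subs = {low[i:i + L] for L in lengths for i in range(len(low) - L + 1)}
--     return {t for t, names in alias_map.items()
--             if any(n.lower() in subs for n in names)}
-- ===== Notes on version B (the rewrite author's own statement) =====
-- stated objective: faster
-- what changed: B builds once a hash set of all substrings of the lowered text whose length matches some alias length, then decides each ticker by set-membership lookups of its lowered aliases, replacing A's per-alias substring scan of the text.
import Mathlib
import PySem

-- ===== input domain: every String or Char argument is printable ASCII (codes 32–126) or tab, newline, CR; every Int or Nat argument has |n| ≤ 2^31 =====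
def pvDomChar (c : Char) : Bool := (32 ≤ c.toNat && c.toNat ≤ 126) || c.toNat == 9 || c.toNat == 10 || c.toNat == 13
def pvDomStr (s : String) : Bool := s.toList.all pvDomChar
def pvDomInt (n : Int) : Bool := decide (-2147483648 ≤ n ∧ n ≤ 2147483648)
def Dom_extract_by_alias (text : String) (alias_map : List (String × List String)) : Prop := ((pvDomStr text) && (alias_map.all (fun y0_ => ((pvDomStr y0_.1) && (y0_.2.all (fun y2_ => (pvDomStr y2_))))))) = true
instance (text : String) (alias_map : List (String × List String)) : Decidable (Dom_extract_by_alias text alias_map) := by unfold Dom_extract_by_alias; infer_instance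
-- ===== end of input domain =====

-- B replaces A's per-alias substring scan of the text by a substring index of the
-- lowered text (all substrings of the relevant lengths, collected once into a set),
-- so each alias test becomes a set-membership lookup; same results, proved equal.


-- ===== PORT A =====
-- inner 'for name in names: if name.lower() in low: hits.add(ticker); break'
def aScan (low : String) (ticker : String) (names : List String) (hits : PySem.Set String) : PySem.Set String :=
  match names with
  | [] => hits
  | name :: rest =>
      if PySem.Str.isIn (PySem.Str.lower name) low then PySem.Set.add hits ticker
      else aScan low ticker rest hits

def extract_by_alias (text : String) (alias_map : List (String × List String)) : List String :=
  if text = "" then PySem.Set.empty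
  else
    let low := PySem.Str.lower text
    alias_map.foldl (fun hits tn => aScan low tn.1 tn.2 hits) PySem.Set.empty

-- ===== PORT B =====
def extract_by_alias_alt (text : String) (alias_map : List (String × List String)) : List String :=
  if text = "" then PySem.Set.empty
  else
    let low := PySem.Str.lower text
    let lengths : PySem.Set Int :=
      PySem.Set.ofList (alias_map.flatMap (fun tn => tn.2.map (fun n => PySem.Str.len n)))
    let subs : PySem.Set String :=
      lengths.foldl
        (fun acc L =>
          (PySem.List.pyRange 0 (PySem.Str.len low - L + 1)).foldl
            (fun acc2 i => PySem.Set.add acc2 (PySem.Str.slice low (some i) (some (i + L)))) acc)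
        PySem.Set.empty
    alias_map.foldl
      (fun hits tn =>
        if tn.2.any (fun n => PySem.Set.contains subs (PySem.Str.lower n)) then PySem.Set.add hits tn.1
        else hits)
      PySem.Set.empty

-- ===== PRECONDITION & SPEC =====
def Spec_extract_by_alias (text : String) (alias_map : List (String × List String)) (out : List String) : Prop := out = extract_by_alias_alt text alias_map
instance (text : String) (alias_map : List (String × List String)) (out : List String) : Decidable (Spec_extract_by_alias text alias_map out) := by unfold Spec_extract_by_alias; infer_instance

-- ===== CLAIM (what is proved, stated in full; the proofs are below) =====
def Claim_equal_extract_by_alias : Prop := ∀ (text : String) (alias_map : List (String × List String)), Dom_extract_by_alias text alias_map → Spec_extract_by_alias text alias_map (extract_by_alias text alias_map)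

-- ===== LEMMAS AND PROOFS =====

-- generic: membership in a fold that only adds elements to a PySem.Set
theorem mem_foldl_step {α β : Type} [BEq α] [LawfulBEq α]
    (step : PySem.Set α → β → PySem.Set α) (P : β → α → Prop)
    (h : ∀ acc e x, x ∈ step acc e ↔ x ∈ acc ∨ P e x) :
    ∀ (l : List β) (init : PySem.Set α) (x : α),
      x ∈ l.foldl step init ↔ x ∈ init ∨ ∃ e ∈ l, P e x := by
  intro l
  induction l with
  | nil => intro init x; simp
  | cons e t ih =>
      intro init x
      simp only [List.foldl_cons, ih, h, List.mem_cons]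
      constructor
      · rintro ((hx | hP) | ⟨e', he', hP⟩)
        · exact Or.inl hx
        · exact Or.inr ⟨e, Or.inl rfl, hP⟩
        · exact Or.inr ⟨e', Or.inr he', hP⟩
      · rintro (hx | ⟨e', (rfl | he'), hP⟩)
        · exact Or.inl (Or.inl hx)
        · exact Or.inl (Or.inr hP)
        · exact Or.inr ⟨e', he', hP⟩

-- the substring index B builds (proof-side name for the let in extract_by_alias_alt)
def subsOf (low : String) (alias_map : List (String × List String)) : PySem.Set String :=
  (PySem.Set.ofList (alias_map.flatMap (fun tn => tn.2.map (fun n => PySem.Str.len n)))).foldl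
    (fun acc L =>
      (PySem.List.pyRange 0 (PySem.Str.len low - L + 1)).foldl
        (fun acc2 i => PySem.Set.add acc2 (PySem.Str.slice low (some i) (some (i + L)))) acc)
    PySem.Set.empty

theorem slice_toList (low : String) (i L : Int) (h0 : 0 ≤ i) (hL : 0 ≤ L) :
    (PySem.Str.slice low (some i) (some (i + L))).toList
      = (low.toList.drop i.toNat).take L.toNat := by
  have : (i + L).toNat - i.toNat = L.toNat := by omega
  rw [PySem.Str.toList_slice, PySem.Chars.slice_eq_listSlice,
      PySem.List.slice_toNat _ h0 (by omega), this]

theorem mem_subsOf (low : String) (alias_map : List (String × List String)) (x : String) :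
    x ∈ subsOf low alias_map ↔
      ∃ L, (∃ tn ∈ alias_map, ∃ n ∈ tn.2, PySem.Str.len n = L) ∧
        ∃ i : Int, 0 ≤ i ∧ i + L ≤ PySem.Str.len low ∧
          x = PySem.Str.slice low (some i) (some (i + L)) := by
  unfold subsOf
  rw [mem_foldl_step _
      (fun L x => ∃ i ∈ PySem.List.pyRange 0 (PySem.Str.len low - L + 1),
        x = PySem.Str.slice low (some i) (some (i + L)))
      (fun acc L x => mem_foldl_step
        (fun acc2 i => PySem.Set.add acc2 (PySem.Str.slice low (some i) (some (i + L))))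
        (fun i x => x = PySem.Str.slice low (some i) (some (i + L)))
        (fun acc2 e y => PySem.Set.mem_add acc2 (PySem.Str.slice low (some e) (some (e + L))) y)
        (PySem.List.pyRange 0 (PySem.Str.len low - L + 1)) acc x)]
  simp only [PySem.Set.mem_ofList, List.mem_flatMap, List.mem_map, PySem.List.mem_pyRange_one]
  constructor
  · rintro (h | ⟨L, hL, i, ⟨hi0, hiR⟩, hx⟩)
    · simp [PySem.Set.empty] at h
    · exact ⟨L, hL, i, hi0, by omega, hx⟩
  · rintro ⟨L, hL, i, hi0, hiL, hx⟩
    exact Or.inr ⟨L, hL, i, ⟨hi0, by omega⟩, hx⟩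

-- each lowered alias of the map is in the index exactly when it occurs in low
theorem contains_subsOf (low : String) (alias_map : List (String × List String)) (n : String)
    (hn : ∃ tn ∈ alias_map, n ∈ tn.2) :
    PySem.Set.contains (subsOf low alias_map) (PySem.Str.lower n)
      = PySem.Str.isIn (PySem.Str.lower n) low := by
  rw [Bool.eq_iff_iff]
  have hmem : PySem.Set.contains (subsOf low alias_map) (PySem.Str.lower n) = true
      ↔ PySem.Str.lower n ∈ subsOf low alias_map := by
    simp [PySem.Set.contains]
  have hplen : (PySem.Str.lower n).toList.length = n.toList.length := by
    rw [PySem.Str.toList_lower]; simp [PySem.Chars.lower]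
  rw [hmem, mem_subsOf]
  constructor
  · rintro ⟨L, ⟨tn, _, n', _, hlen⟩, i, hi0, hiL, hx⟩
    have hL0 : 0 ≤ L := by rw [← hlen, PySem.Str.len_eq]; positivity
    rw [PySem.Str.isIn_iff_infix, hx, slice_toList low i L hi0 hL0]
    exact (List.take_prefix _ _).isInfix.trans (List.drop_suffix _ _).isInfix
  · intro h
    rw [PySem.Str.isIn_iff_infix] at h
    obtain ⟨j, hpre⟩ := (PySem.Chars.exists_prefix_drop_iff_isIn
        (PySem.Str.lower n).toList low.toList).mpr
      (by rwa [← PySem.Chars.isIn_iff_infix] at h)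
    set j' := min j low.toList.length with hj'
    have hpre' : (PySem.Str.lower n).toList <+: low.toList.drop j' := by
      by_cases hj : j ≤ low.toList.length
      · rw [hj', min_eq_left hj]; exact hpre
      · have hd : low.toList.drop j = [] := List.drop_eq_nil_of_le (by omega)
        rw [hd] at hpre
        rw [List.prefix_nil] at hpre
        simp [hpre]
    have hle : (PySem.Str.lower n).toList.length ≤ low.toList.length - j' := by
      have := hpre'.length_le
      simpa using this
    obtain ⟨tn0, htn0, hn0⟩ := hn
    refine ⟨PySem.Str.len n, ⟨tn0, htn0, n, hn0, rfl⟩, (j' : Int), by positivity, ?_, ?_⟩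
    · rw [PySem.Str.len_eq, PySem.Str.len_eq]
      have hj'le : j' ≤ low.toList.length := min_le_right _ _
      omega
    · apply String.toList_inj.mp
      rw [slice_toList low _ _ (by positivity) (by rw [PySem.Str.len_eq]; positivity)]
      have : (PySem.Str.len n).toNat = (PySem.Str.lower n).toList.length := by
        rw [PySem.Str.len_eq, hplen]; omega
      rw [this, Int.toNat_natCast]
      exact (List.prefix_iff_eq_take.mp hpre')

theorem aScan_eq (low : String) (t : String) (names : List String) (hits : PySem.Set String) :
    aScan low t names hits
      = if names.any (fun n => PySem.Str.isIn (PySem.Str.lower n) low) then PySem.Set.add hits t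
        else hits := by
  induction names with
  | nil => simp [aScan]
  | cons n rest ih =>
      rw [show aScan low t (n :: rest) hits
            = if PySem.Str.isIn (PySem.Str.lower n) low then PySem.Set.add hits t
              else aScan low t rest hits from rfl,
          List.any_cons]
      cases h : PySem.Str.isIn (PySem.Str.lower n) low
      · rw [if_neg (by simp), ih, Bool.false_or]
      · rw [if_pos rfl, Bool.true_or, if_pos rfl]

-- ===== VERDICT (by name: the statement is the Claim_ definition above) =====
theorem extract_by_alias_spec : Claim_equal_extract_by_alias := by
  intro text alias_map _
  unfold Spec_extract_by_alias extract_by_alias extract_by_alias_alt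
  by_cases ht : text = ""
  · simp [ht]
  · simp only [if_neg ht]
    apply PySem.List.foldl_congr_mem
    intro hits tn htn
    have hany : tn.2.any (fun n =>
        PySem.Set.contains (subsOf (PySem.Str.lower text) alias_map) (PySem.Str.lower n))
        = tn.2.any (fun n => PySem.Str.isIn (PySem.Str.lower n) (PySem.Str.lower text)) := by
      refine PySem.List.any_congr_mem ?_
      intro n hn
      exact contains_subsOf _ _ _ ⟨tn, htn, hn⟩
    show aScan (PySem.Str.lower text) tn.1 tn.2 hits
      = if tn.2.any (fun n =>
          PySem.Set.contains (subsOf (PySem.Str.lower text) alias_map) (PySem.Str.lower n)) then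
          PySem.Set.add hits tn.1
        else hits
    rw [aScan_eq, hany]
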